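-- pv_equiv track=rewrite | github.com/rakeshmeena5499/haptikAssignment | task3.py | can_create
-- ===== SOURCE A (Python) =====
-- def can_create(list_of_strings, input_string):
-- 	possible_perms = []
-- 	for i in range(0, len(list_of_strings)):
-- 		for j in range(0, len(list_of_strings)):
-- 			if(i!=j):
-- 				possible_perms.append(list_of_strings[i]+list_of_strings[j])
-- 	if input_string in possible_perms:
-- 		return True
-- 	else:
-- 		return False
--
-- list_of_strings = ['back', 'end', 'front', 'tree']
-- ===== SOURCE B (Python) =====
-- def can_create(list_of_strings, input_string):
--     counts = {}
--     for s in list_of_strings: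
--         counts[s] = counts.get(s, 0) + 1
--     for k in range(len(input_string) + 1):
--         prefix = input_string[:k]
--         suffix = input_string[k:]
--         if prefix == suffix:
--             if counts.get(prefix, 0) >= 2:
--                 return True
--         elif prefix in counts and suffix in counts:
--             return True
--     return False
-- ===== Notes on version B (the rewrite author's own statement) =====
-- stated objective: faster
-- what changed: Instead of materialising all n*(n-1) ordered concatenations and testing membership, B builds a count dictionary of the list once and tests each of the |s|+1 split points of the input for prefix/suffix presence (count >= 2 when prefix equals suffix, so the two entries are distinct).
import Mathlib
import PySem

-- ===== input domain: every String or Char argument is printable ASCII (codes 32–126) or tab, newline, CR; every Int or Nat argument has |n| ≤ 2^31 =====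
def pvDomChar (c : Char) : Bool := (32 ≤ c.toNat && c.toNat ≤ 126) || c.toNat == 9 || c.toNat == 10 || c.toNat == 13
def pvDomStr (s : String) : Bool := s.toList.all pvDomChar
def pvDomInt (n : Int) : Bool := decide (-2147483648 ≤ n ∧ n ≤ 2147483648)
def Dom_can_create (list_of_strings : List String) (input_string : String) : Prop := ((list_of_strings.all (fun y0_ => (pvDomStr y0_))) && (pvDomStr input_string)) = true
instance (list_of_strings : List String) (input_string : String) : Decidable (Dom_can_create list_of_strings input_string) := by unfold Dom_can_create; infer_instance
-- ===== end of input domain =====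

-- B replaces A's materialisation of all n·(n-1) ordered concatenations by a count dictionary
-- built once plus a scan over the |s|+1 split points of the input (objective: faster).

-- ===== PORT A =====
def can_create (list_of_strings : List String) (input_string : String) : Bool :=
  let possible_perms :=
    (PySem.List.pyRange 0 list_of_strings.length 1).foldl (fun acc i =>
      (PySem.List.pyRange 0 list_of_strings.length 1).foldl (fun acc j =>
        if i ≠ j then
          acc ++ [String.ofList ((PySem.List.pyGetD list_of_strings i "").toList
                                  ++ (PySem.List.pyGetD list_of_strings j "").toList)]
        else acc) acc) []
  if input_string ∈ possible_perms then true else false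

-- ===== PORT B =====
def can_create_alt (list_of_strings : List String) (input_string : String) : Bool :=
  let counts := list_of_strings.foldl
    (fun d x => d.insert x (d.getD x 0 + 1)) (PySem.Dict.empty : PySem.Dict String Int)
  (PySem.List.pyRange 0 (PySem.Str.len input_string + 1) 1).any (fun k =>
    let p := String.ofList (PySem.List.slice input_string.toList none (some k))
    let q := String.ofList (PySem.List.slice input_string.toList (some k) none)
    if p = q then decide (2 ≤ counts.getD p 0)
    else counts.contains p && counts.contains q)

-- ===== PRECONDITION & SPEC =====
def Spec_can_create (list_of_strings : List String) (input_string : String) (out : Bool) : Prop := out = can_create_alt list_of_strings input_string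
instance (list_of_strings : List String) (input_string : String) (out : Bool) : Decidable (Spec_can_create list_of_strings input_string out) := by unfold Spec_can_create; infer_instance

-- ===== CLAIM (what is proved, stated in full; the proofs are below) =====
def Claim_equal_can_create : Prop := ∀ (list_of_strings : List String) (input_string : String), Dom_can_create list_of_strings input_string → Spec_can_create list_of_strings input_string (can_create list_of_strings input_string)

-- ===== LEMMAS AND PROOFS =====

-- two occurrences at distinct positions (ordered i < j) give count ≥ 2
theorem pv_count_two_of_lt {α : Type} [DecidableEq α] (l : List α) (x : α)
    (i j : Nat) (hij : i < j) (hj : j < l.length) (hxi : l[i]'(by omega) = x)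
    (hxj : l[j]'hj = x) : 2 ≤ l.count x := by
  have hsplit : l = l.take (i+1) ++ l.drop (i+1) := (List.take_append_drop _ _).symm
  have h1 : x ∈ l.take (i+1) := by
    have : (l.take (i+1))[i]'(by simp; omega) = x := by
      rw [List.getElem_take]; exact hxi
    exact this ▸ List.getElem_mem _
  have h2 : x ∈ l.drop (i+1) := by
    have hlt : j - (i+1) < (l.drop (i+1)).length := by simp; omega
    have : (l.drop (i+1))[j - (i+1)]'hlt = x := by
      rw [List.getElem_drop]
      have heq : i + 1 + (j - (i+1)) = j := by omega
      simp_rw [heq]; exact hxj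
    exact this ▸ List.getElem_mem _
  have c1 : 1 ≤ (l.take (i+1)).count x := List.count_pos_iff.mpr h1
  have c2 : 1 ≤ (l.drop (i+1)).count x := List.count_pos_iff.mpr h2
  calc 2 ≤ (l.take (i+1)).count x + (l.drop (i+1)).count x := by omega
    _ = l.count x := by rw [← List.count_append, ← hsplit]

theorem pv_count_two {α : Type} [DecidableEq α] (l : List α) (x : α)
    (i j : Nat) (hij : i ≠ j) (hi : i < l.length) (hj : j < l.length)
    (hxi : l[i]'hi = x) (hxj : l[j]'hj = x) : 2 ≤ l.count x := by
  rcases Nat.lt_or_gt_of_ne hij with h | h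
  · exact pv_count_two_of_lt l x i j h hj hxi hxj
  · exact pv_count_two_of_lt l x j i h hi hxj hxi

-- count ≥ 2 gives two distinct positions
theorem pv_two_idx {α : Type} [DecidableEq α] (l : List α) (x : α)
    (h : 2 ≤ l.count x) :
    ∃ i j : Nat, ∃ (hi : i < l.length) (hj : j < l.length),
      i ≠ j ∧ l[i]'hi = x ∧ l[j]'hj = x := by
  have hdup : List.Duplicate x l := List.duplicate_iff_two_le_count.mpr h
  induction hdup with
  | cons_mem hm =>
    obtain ⟨k, hk, hkx⟩ := List.mem_iff_getElem.mp hm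
    exact ⟨0, k+1, by simp, by simp; omega, by omega, rfl, by simpa using hkx⟩
  | cons_duplicate hd ih =>
    obtain ⟨i, j, hi, hj, hij, hxi, hxj⟩ := ih (List.duplicate_iff_two_le_count.mp hd)
    exact ⟨i+1, j+1, by simp; omega, by simp; omega, by omega, by simpa using hxi,
      by simpa using hxj⟩

-- the characterisation both ports reduce to: x and y occur at distinct indices
theorem pv_pairs_iff {α : Type} [DecidableEq α] (l : List α) (x y : α) :
    (∃ i j : Nat, ∃ (hi : i < l.length) (hj : j < l.length),
        i ≠ j ∧ l[i]'hi = x ∧ l[j]'hj = y)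
      ↔ ((x = y ∧ 2 ≤ l.count x) ∨ (x ≠ y ∧ x ∈ l ∧ y ∈ l)) := by
  constructor
  · rintro ⟨i, j, hi, hj, hij, hxi, hxj⟩
    by_cases hxy : x = y
    · exact Or.inl ⟨hxy, pv_count_two l x i j hij hi hj hxi (hxy ▸ hxj)⟩
    · exact Or.inr ⟨hxy, hxi ▸ List.getElem_mem _, hxj ▸ List.getElem_mem _⟩
  · rintro (⟨hxy, hc⟩ | ⟨hxy, hx, hy⟩)
    · obtain ⟨i, j, hi, hj, hij, hxi, hxj⟩ := pv_two_idx l x hc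
      exact ⟨i, j, hi, hj, hij, hxi, hxy ▸ hxj⟩
    · obtain ⟨i, hi, hxi⟩ := List.mem_iff_getElem.mp hx
      obtain ⟨j, hj, hxj⟩ := List.mem_iff_getElem.mp hy
      refine ⟨i, j, hi, hj, fun h => hxy ?_, hxi, hxj⟩
      subst h; rw [← hxi, ← hxj]

-- A = true ↔ the input splits as l[i] ++ l[j] at distinct indices
theorem pv_A_iff (l : List String) (s : String) :
    can_create l s = true ↔
      ∃ i j : Nat, ∃ (hi : i < l.length) (hj : j < l.length),
        i ≠ j ∧ s.toList = (l[i]'hi).toList ++ (l[j]'hj).toList := by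
  unfold can_create
  simp only [PySem.List.foldl_append_ite, PySem.List.foldl_append_eq_flatMap]
  simp only [List.nil_append]
  have hmem : ∀ (c : Prop) (inst : Decidable c), ((if c then true else false) = true ↔ c) := by
    intro c inst; split <;> simp_all
  rw [hmem]
  simp only [List.mem_flatMap, List.mem_map, List.mem_filter, PySem.List.mem_pyRange_one,
    decide_eq_true_eq]
  constructor
  · rintro ⟨i, ⟨h0i, hin⟩, x, ⟨⟨h0j, hjn⟩, hij⟩, hsx⟩
    refine ⟨i.toNat, x.toNat, by omega, by omega, by omega, ?_⟩
    rw [PySem.List.pyGetD_eq_getElem l _ h0i hin, PySem.List.pyGetD_eq_getElem l _ h0j hjn] at hsx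
    have := congrArg String.toList hsx.symm
    simpa using this
  · rintro ⟨i, j, hi, hj, hij, hs⟩
    refine ⟨(i : Int), ⟨by omega, by omega⟩, (j : Int), ⟨⟨by omega, by omega⟩, by omega⟩, ?_⟩
    rw [PySem.List.pyGetD_eq_getElem l _ (by omega) (by exact_mod_cast hi),
        PySem.List.pyGetD_eq_getElem l _ (by omega) (by exact_mod_cast hj)]
    simp only [Int.toNat_natCast]
    apply String.ext
    simpa using hs.symm

-- B = true ↔ some split point of the input satisfies the count test
theorem pv_B_iff (l : List String) (s : String) :
    can_create_alt l s = true ↔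
      ∃ k : Nat, k ≤ s.toList.length ∧
        ((String.ofList (s.toList.take k) = String.ofList (s.toList.drop k)
            ∧ 2 ≤ l.count (String.ofList (s.toList.take k))) ∨
         (String.ofList (s.toList.take k) ≠ String.ofList (s.toList.drop k)
            ∧ String.ofList (s.toList.take k) ∈ l ∧ String.ofList (s.toList.drop k) ∈ l)) := by
  unfold can_create_alt
  rw [PySem.Dict.foldl_insert_getD_add_one_eq_counter]
  simp only [List.any_eq_true, PySem.List.mem_pyRange_one, PySem.Str.len_eq]
  have hbody : ∀ (p q : String),
      ((if p = q then decide (2 ≤ (PySem.Dict.counter l).getD p 0)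
        else (PySem.Dict.counter l).contains p && (PySem.Dict.counter l).contains q) = true)
      ↔ ((p = q ∧ 2 ≤ l.count p) ∨ (p ≠ q ∧ p ∈ l ∧ q ∈ l)) := by
    intro p q
    split
    · rename_i h
      simp only [PySem.Dict.getD_counter, decide_eq_true_eq]
      constructor
      · intro hc; exact Or.inl ⟨h, by exact_mod_cast hc⟩
      · rintro (⟨_, hc⟩ | ⟨hne, _⟩)
        · exact_mod_cast hc
        · exact absurd h hne
    · rename_i h
      simp only [PySem.Dict.contains_counter, Bool.and_eq_true, List.contains_eq_mem,
        decide_eq_true_eq]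
      constructor
      · intro hc; exact Or.inr ⟨h, hc.1, hc.2⟩
      · rintro (⟨he, _⟩ | ⟨_, h1, h2⟩)
        · exact absurd he h
        · exact ⟨h1, h2⟩
  constructor
  · rintro ⟨k, ⟨h0, hk⟩, hcond⟩
    rw [PySem.List.slice_to _ h0, PySem.List.slice_from _ h0] at hcond
    exact ⟨k.toNat, by omega, (hbody _ _).mp hcond⟩
  · rintro ⟨k, hk, hc⟩
    refine ⟨(k : Int), ⟨by omega, by omega⟩, ?_⟩
    rw [PySem.List.slice_to _ (by omega), PySem.List.slice_from _ (by omega)]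
    simp only [Int.toNat_natCast]
    exact (hbody _ _).mpr hc

-- the two characterisations agree: a distinct-index split IS a split point passing the counts
theorem pv_bridge (l : List String) (s : String) :
    (∃ i j : Nat, ∃ (hi : i < l.length) (hj : j < l.length),
        i ≠ j ∧ s.toList = (l[i]'hi).toList ++ (l[j]'hj).toList) ↔
      ∃ k : Nat, k ≤ s.toList.length ∧
        ((String.ofList (s.toList.take k) = String.ofList (s.toList.drop k)
            ∧ 2 ≤ l.count (String.ofList (s.toList.take k))) ∨
         (String.ofList (s.toList.take k) ≠ String.ofList (s.toList.drop k)
            ∧ String.ofList (s.toList.take k) ∈ l ∧ String.ofList (s.toList.drop k) ∈ l)) := by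
  constructor
  · rintro ⟨i, j, hi, hj, hij, hs⟩
    refine ⟨(l[i]'hi).toList.length, by rw [hs]; simp, ?_⟩
    have ht : s.toList.take (l[i]'hi).toList.length = (l[i]'hi).toList := by
      rw [hs]; exact List.take_left
    have hd : s.toList.drop (l[i]'hi).toList.length = (l[j]'hj).toList := by
      rw [hs]; exact List.drop_left
    rw [ht, hd, String.ofList_toList, String.ofList_toList]
    exact (pv_pairs_iff l _ _).mp ⟨i, j, hi, hj, hij, rfl, rfl⟩
  · rintro ⟨k, hk, hc⟩
    obtain ⟨i, j, hi, hj, hij, hxi, hxj⟩ := (pv_pairs_iff l _ _).mpr hc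
    refine ⟨i, j, hi, hj, hij, ?_⟩
    rw [hxi, hxj]
    simp only [String.toList_ofList]
    exact (List.take_append_drop k s.toList).symm

-- ===== VERDICT (by name: the statement is the Claim_ definition above) =====
theorem can_create_spec : Claim_equal_can_create := by
  intro l s _
  unfold Spec_can_create
  rw [Bool.eq_iff_iff, pv_A_iff, pv_B_iff]
  exact pv_bridge l s
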